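-- pv_equiv track=rewrite | github.com/nxtcarson/sillage | core/decorators.py | tier_has_feature
-- ===== SOURCE A (Python) =====
-- TIER_ORDER = {"free": 0, "basic": 1, "standard": 2, "pro": 3}
--
-- def tier_has_feature(org_tier, feature):
--     tier_level = TIER_ORDER.get((org_tier or "free").lower(), 0)
--     feature_tiers = {
--         "calendar": ["standard", "pro"],
--         "time_tracking": ["pro"],
--         "private_boards": ["pro"],
--         "automations": ["standard", "pro"],
--         "priority_support": ["basic", "standard", "pro"],
--     }
--     required = feature_tiers.get(feature, [])
--     return any(tier_level >= TIER_ORDER.get(t, 0) for t in required)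
-- ===== SOURCE B (Python) =====
-- def tier_has_feature(org_tier, feature):
--     name = (org_tier or "free").lower()
--     if name == "basic":
--         level = 1
--     elif name == "standard":
--         level = 2
--     elif name == "pro":
--         level = 3
--     else:
--         level = 0
--     if feature == "priority_support":
--         need = 1
--     elif feature == "calendar" or feature == "automations":
--         need = 2
--     elif feature == "time_tracking" or feature == "private_boards":
--         need = 3
--     else:
--         return False
--     return level >= need
-- ===== Notes on version B (the rewrite author's own statement) =====
-- stated objective: simpler
-- what changed: Drops both dicts and the any() scan over the per-feature tier list: B maps the tier name to its numeric level and the feature to its single minimum required level with plain conditional chains and returns one comparison.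
import Mathlib
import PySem

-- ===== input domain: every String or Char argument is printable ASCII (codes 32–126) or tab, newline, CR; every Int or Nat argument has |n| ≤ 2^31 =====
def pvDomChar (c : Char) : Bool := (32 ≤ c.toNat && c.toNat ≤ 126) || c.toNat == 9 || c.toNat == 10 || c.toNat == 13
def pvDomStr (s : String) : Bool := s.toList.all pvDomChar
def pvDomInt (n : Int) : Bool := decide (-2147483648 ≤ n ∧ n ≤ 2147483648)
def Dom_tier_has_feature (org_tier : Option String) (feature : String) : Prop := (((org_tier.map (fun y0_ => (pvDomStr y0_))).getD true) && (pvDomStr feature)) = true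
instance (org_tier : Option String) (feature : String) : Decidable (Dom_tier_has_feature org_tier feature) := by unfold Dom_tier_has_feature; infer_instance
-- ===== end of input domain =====

-- B drops both dicts and the any() scan: plain conditional chains map the tier name to its
-- numeric level and the feature to its minimum required level, then one comparison; simpler.

-- ===== PORT A =====
-- TIER_ORDER = {"free": 0, "basic": 1, "standard": 2, "pro": 3}
def TIER_ORDER : PySem.Dict String Int :=
  PySem.Dict.ofList [("free", 0), ("basic", 1), ("standard", 2), ("pro", 3)]

-- feature_tiers, A's local dict literal, hoisted to a named constant
def FEATURE_TIERS : PySem.Dict String (List String) :=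
  PySem.Dict.ofList
    [("calendar", ["standard", "pro"]),
     ("time_tracking", ["pro"]),
     ("private_boards", ["pro"]),
     ("automations", ["standard", "pro"]),
     ("priority_support", ["basic", "standard", "pro"])]

def tier_has_feature (org_tier : Option String) (feature : String) : Bool :=
  -- (org_tier or "free"): falsy = None or ""
  let t : String := match org_tier with
    | none => "free"
    | some s => if s = "" then "free" else s
  let tier_level : Int := TIER_ORDER.getD (PySem.Str.lower t) 0
  let required := FEATURE_TIERS.getD feature []
  required.any (fun tq => decide (tier_level ≥ TIER_ORDER.getD tq 0))

-- ===== PORT B =====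
def tier_has_feature_alt (org_tier : Option String) (feature : String) : Bool :=
  let name : String := PySem.Str.lower (match org_tier with
    | none => "free"
    | some s => if s = "" then "free" else s)
  let level : Int :=
    if name = "basic" then 1
    else if name = "standard" then 2
    else if name = "pro" then 3
    else 0
  if feature = "priority_support" then decide (level ≥ 1)
  else if feature = "calendar" ∨ feature = "automations" then decide (level ≥ 2)
  else if feature = "time_tracking" ∨ feature = "private_boards" then decide (level ≥ 3)
  else false

-- ===== PRECONDITION & SPEC =====
def Spec_tier_has_feature (org_tier : Option String) (feature : String) (out : Bool) : Prop := out = tier_has_feature_alt org_tier feature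
instance (org_tier : Option String) (feature : String) (out : Bool) : Decidable (Spec_tier_has_feature org_tier feature out) := by unfold Spec_tier_has_feature; infer_instance

-- ===== CLAIM (what is proved, stated in full; the proofs are below) =====
def Claim_equal_tier_has_feature : Prop := ∀ (org_tier : Option String) (feature : String), Dom_tier_has_feature org_tier feature → Spec_tier_has_feature org_tier feature (tier_has_feature org_tier feature)

-- ===== LEMMAS AND PROOFS =====

-- A's TIER_ORDER.get(s, 0) equals B's conditional chain for the level
theorem getD_tier_order (s : String) :
    TIER_ORDER.getD s 0
    = (if s = "basic" then 1
       else if s = "standard" then 2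
       else if s = "pro" then 3
       else 0) := by
  by_cases h0 : s = "free"
  · subst h0; decide
  by_cases h1 : s = "basic"
  · subst h1; decide
  by_cases h2 : s = "standard"
  · subst h2; decide
  by_cases h3 : s = "pro"
  · subst h3; decide
  · simp only [h1, h2, h3, if_false]
    simp [TIER_ORDER, PySem.Dict.ofList, PySem.Dict.update, PySem.Dict.getD,
      PySem.Dict.get?_insert, h0, h1, h2, h3]

-- A's any() over the feature's tier list equals B's single comparison per feature
theorem any_vs_chain (L : Int) (feature : String) :
    ((FEATURE_TIERS.getD feature []).any
        (fun tq => decide (L ≥ TIER_ORDER.getD tq 0)))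
    = (if feature = "priority_support" then decide (L ≥ 1)
       else if feature = "calendar" ∨ feature = "automations" then decide (L ≥ 2)
       else if feature = "time_tracking" ∨ feature = "private_boards" then decide (L ≥ 3)
       else false) := by
  by_cases h5 : feature = "priority_support"
  · subst h5
    rw [show FEATURE_TIERS.getD "priority_support" [] = ["basic", "standard", "pro"] from by decide]
    simp only [List.any_cons, List.any_nil, Bool.or_false,
        show TIER_ORDER.getD "basic" 0 = 1 from by decide,
        show TIER_ORDER.getD "standard" 0 = 2 from by decide,
        show TIER_ORDER.getD "pro" 0 = 3 from by decide]
    by_cases h : (1:Int) ≤ L <;> simp [h] <;> omega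
  by_cases h1 : feature = "calendar"
  · subst h1
    rw [show FEATURE_TIERS.getD "calendar" [] = ["standard", "pro"] from by decide]
    simp only [List.any_cons, List.any_nil, Bool.or_false,
        show TIER_ORDER.getD "standard" 0 = 2 from by decide,
        show TIER_ORDER.getD "pro" 0 = 3 from by decide]
    norm_num
    by_cases h : (2:Int) ≤ L <;> simp [h] <;> omega
  by_cases h4 : feature = "automations"
  · subst h4
    rw [show FEATURE_TIERS.getD "automations" [] = ["standard", "pro"] from by decide]
    simp only [List.any_cons, List.any_nil, Bool.or_false,
        show TIER_ORDER.getD "standard" 0 = 2 from by decide,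
        show TIER_ORDER.getD "pro" 0 = 3 from by decide]
    norm_num
    by_cases h : (2:Int) ≤ L <;> simp [h] <;> omega
  by_cases h2 : feature = "time_tracking"
  · subst h2
    rw [show FEATURE_TIERS.getD "time_tracking" [] = ["pro"] from by decide]
    simp [show TIER_ORDER.getD "pro" 0 = 3 from by decide, h5, h1, h4]
  by_cases h3 : feature = "private_boards"
  · subst h3
    rw [show FEATURE_TIERS.getD "private_boards" [] = ["pro"] from by decide]
    simp [show TIER_ORDER.getD "pro" 0 = 3 from by decide, h5, h1, h4, h2]
  · rw [show FEATURE_TIERS.getD feature [] = [] from by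
        simp [FEATURE_TIERS, PySem.Dict.ofList, PySem.Dict.update, PySem.Dict.getD,
          PySem.Dict.get?_insert, h1, h2, h3, h4, h5]]
    simp [List.any, h1, h2, h3, h4, h5]

-- ===== VERDICT (by name: the statement is the Claim_ definition above) =====
theorem tier_has_feature_spec : Claim_equal_tier_has_feature := by
  intro org_tier feature _
  simp only [Spec_tier_has_feature, tier_has_feature, tier_has_feature_alt]
  rw [any_vs_chain, ← getD_tier_order]
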